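-- pv_equiv track=rewrite | github.com/hojelse/thesis | code/parse_newick.py | tokenize_newick
-- ===== SOURCE A (Python) =====
-- def tokenize_newick(s: str) -> list:
-- 	tokens = []
-- 	token = ''
-- 	for c in s:
-- 		if c.isnumeric():
-- 			token += c
-- 		else:
-- 			if len(token) > 0:
-- 				tokens.append(token)
-- 			token = ''
-- 		if c != ' ':
-- 			pass
-- 		if c == '(':
-- 			tokens.append('(')
-- 		if c == ')':
-- 			tokens.append(')')
-- 		if c == ',':
-- 			tokens.append(',')
-- 	return tokens
-- ===== SOURCE B (Python) =====
-- def tokenize_newick(s: str) -> list: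
--     tokens = []
--     i = 0
--     n = len(s)
--     while i < n:
--         if s[i].isnumeric():
--             j = i
--             while j < n and s[j].isnumeric():
--                 j += 1
--             tokens.append(s[i:j])
--             i = j
--         else:
--             if s[i] in '(),':
--                 tokens.append(s[i])
--             i += 1
--     return tokens
-- ===== Notes on version B (the rewrite author's own statement) =====
-- stated objective: alternative
-- what changed: B replaces A's char-by-char accumulator scan (building a pending token string and flushing it on each non-numeric character) with an index/run-based scanner that finds each maximal numeric run with an inner pointer and slices it out, emitting bracket/comma characters directly; B also emits a trailing numeric run that A silently drops.
-- intended difference: On inputs whose last character is numeric, A silently drops the final number token (its loop only flushes a pending number when a later non-numeric character arrives), e.g. A('1,2')==['1',','], while B returns ['1',',','2']; a tokenizer is meant to return every number. — e.g. on tokenize_newick("1,2"): A returns ["1", ","], B returns ["1", ",", "2"]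
import Mathlib
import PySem

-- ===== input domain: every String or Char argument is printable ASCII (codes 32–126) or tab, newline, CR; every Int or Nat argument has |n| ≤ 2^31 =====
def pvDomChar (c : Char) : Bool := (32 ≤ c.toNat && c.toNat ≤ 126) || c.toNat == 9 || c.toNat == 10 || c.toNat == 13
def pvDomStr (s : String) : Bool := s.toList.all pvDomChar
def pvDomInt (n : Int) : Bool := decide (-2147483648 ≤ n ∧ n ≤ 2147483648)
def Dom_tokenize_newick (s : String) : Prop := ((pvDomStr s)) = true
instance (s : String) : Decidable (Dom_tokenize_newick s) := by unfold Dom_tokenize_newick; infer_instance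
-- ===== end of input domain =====

-- B replaces A's pending-token accumulator scan with an index/run slicing scanner (alternative, same cost);
-- B also emits a trailing numeric run that A silently drops (see D_tokenize_newick).

-- str.isnumeric, exact on the ASCII domain Dom_tokenize_newick (where isnumeric ⇔ '0'..'9')
def pyIsNumeric (c : Char) : Bool := c.isDigit

-- ===== PORT A =====
-- one iteration of A's for-loop; state = (tokens, token); the `if c != ' ': pass` line is a no-op
def stepA (st : List String × List Char) (c : Char) : List String × List Char :=
  let p : List String × List Char :=
    if pyIsNumeric c then (st.1, st.2 ++ [c])
    else (if st.2.length > 0 then st.1 ++ [String.ofList st.2] else st.1, [])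
  let t1 := if c = '(' then p.1 ++ ["("] else p.1
  let t2 := if c = ')' then t1 ++ [")"] else t1
  let t3 := if c = ',' then t2 ++ [","] else t2
  (t3, p.2)

def tokenize_newick (s : String) : List String :=
  (s.toList.foldl stepA ([], [])).1

-- ===== PORT B =====
-- B's while-loop over an index i: at a numeric char slice out the maximal run (the inner `while j` scan
-- is the takeWhile, setting `i = j` is the dropWhile); otherwise emit the char if it is a bracket/comma.
-- fuel = number of remaining loop iterations, initially the string length (n - i only shrinks); the
-- `0, _ :: _` case is unreachable with that fuel.
def altGo : Nat → List Char → List String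
  | _, [] => []
  | 0, _ :: _ => []
  | fuel + 1, c :: rest =>
    if pyIsNumeric c then
      String.ofList ((c :: rest).takeWhile pyIsNumeric) :: altGo fuel ((c :: rest).dropWhile pyIsNumeric)
    else if c = '(' ∨ c = ')' ∨ c = ',' then
      String.ofList [c] :: altGo fuel rest
    else
      altGo fuel rest

def tokenize_newick_alt (s : String) : List String := altGo s.toList.length s.toList

-- ===== PRECONDITION & SPEC =====
-- On inputs whose last character is numeric, A silently drops the final number token (its loop only
-- flushes a pending number when a later non-numeric character arrives); B returns it, as a tokenizer should.
def D_tokenize_newick (s : String) : Prop := (s.toList.reverse.headD 'x').isDigit = true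
instance (s : String) : Decidable (D_tokenize_newick s) := by unfold D_tokenize_newick; infer_instance

def Spec_tokenize_newick (s : String) (out : List String) : Prop :=
  ¬ D_tokenize_newick s → out = tokenize_newick_alt s
instance (s : String) (out : List String) : Decidable (Spec_tokenize_newick s out) := by
  unfold Spec_tokenize_newick; infer_instance

def pvDiffWitness_tokenize_newick : String := "1,2"
def pvDiffWitnessOut_tokenize_newick : (List String) × (List String) := (["1", ","], ["1", ",", "2"])

-- ===== CLAIM (what is proved, stated in full; the proofs are below) =====
def Claim_unchanged_tokenize_newick : Prop :=
  ∀ (s : String), Dom_tokenize_newick s → Spec_tokenize_newick s (tokenize_newick s)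
def Claim_changed_tokenize_newick : Prop :=
  Dom_tokenize_newick (pvDiffWitness_tokenize_newick) ∧ D_tokenize_newick (pvDiffWitness_tokenize_newick) ∧ tokenize_newick (pvDiffWitness_tokenize_newick) = pvDiffWitnessOut_tokenize_newick.1 ∧ tokenize_newick_alt (pvDiffWitness_tokenize_newick) = pvDiffWitnessOut_tokenize_newick.2 ∧ pvDiffWitnessOut_tokenize_newick.1 ≠ pvDiffWitnessOut_tokenize_newick.2
def Claim_exact_tokenize_newick : Prop :=
  ∀ (s : String), Dom_tokenize_newick s → D_tokenize_newick s → tokenize_newick s ≠ tokenize_newick_alt s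

-- ===== LEMMAS AND PROOFS =====

-- the bracket/comma token a non-numeric character contributes
def emitTok (c : Char) : List String :=
  if c = '(' then ["("] else if c = ')' then [")"] else if c = ',' then [","] else []

-- A's behaviour after the loop would flush the pending token (proof-side only)
def finalizeA (st : List String × List Char) : List String :=
  if st.2.length > 0 then st.1 ++ [String.ofList st.2] else st.1

theorem stepA_num {c : Char} (hc : pyIsNumeric c = true) (tokens : List String) (token : List Char) :
    stepA (tokens, token) c = (tokens, token ++ [c]) := by
  have h1 : c ≠ '(' := by rintro rfl; simp [pyIsNumeric, Char.isDigit] at hc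
  have h2 : c ≠ ')' := by rintro rfl; simp [pyIsNumeric, Char.isDigit] at hc
  have h3 : c ≠ ',' := by rintro rfl; simp [pyIsNumeric, Char.isDigit] at hc
  simp [stepA, hc, h1, h2, h3]

theorem stepA_nonnum {c : Char} (hc : pyIsNumeric c = false) (tokens : List String) (token : List Char) :
    stepA (tokens, token) c =
      ((if token.length > 0 then tokens ++ [String.ofList token] else tokens) ++ emitTok c, []) := by
  simp only [stepA, emitTok, hc, Bool.false_eq_true, if_false]
  split_ifs <;> simp_all

theorem stepA_hom (tokens : List String) (token : List Char) (c : Char) :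
    stepA (tokens, token) c = (tokens ++ (stepA ([], token) c).1, (stepA ([], token) c).2) := by
  by_cases hc : pyIsNumeric c = true
  · simp [stepA_num hc]
  · rw [stepA_nonnum (Bool.not_eq_true _ ▸ hc), stepA_nonnum (Bool.not_eq_true _ ▸ hc)]
    split_ifs <;> simp

theorem foldA_hom : ∀ (cs : List Char) (tokens : List String) (token : List Char),
    List.foldl stepA (tokens, token) cs =
      (tokens ++ (List.foldl stepA ([], token) cs).1, (List.foldl stepA ([], token) cs).2)
  | [], tokens, token => by simp
  | c :: cs, tokens, token => by
    simp only [List.foldl_cons]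
    rw [stepA_hom tokens token c]
    rw [foldA_hom cs (tokens ++ (stepA ([], token) c).1) (stepA ([], token) c).2,
        foldA_hom cs (stepA ([], token) c).1 (stepA ([], token) c).2]
    simp

theorem foldA_run : ∀ (r : List Char), (∀ c ∈ r, pyIsNumeric c = true) →
    ∀ (rest : List Char) (tokens : List String) (token : List Char),
    List.foldl stepA (tokens, token) (r ++ rest) = List.foldl stepA (tokens, token ++ r) rest
  | [], _, rest, tokens, token => by simp
  | c :: r, h, rest, tokens, token => by
    simp only [List.cons_append, List.foldl_cons]
    rw [stepA_num (h c (by simp)) tokens token,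
        foldA_run r (fun d hd => h d (by simp [hd])) rest]
    simp

theorem finalizeA_append (a b : List String) (t : List Char) :
    finalizeA (a ++ b, t) = a ++ finalizeA (b, t) := by
  simp only [finalizeA]; split_ifs <;> simp

theorem altGo_nonnum {c : Char} (hc : pyIsNumeric c = false) (fuel : Nat) (rest : List Char) :
    altGo (fuel + 1) (c :: rest) = emitTok c ++ altGo fuel rest := by
  rw [altGo]
  simp only [hc, Bool.false_eq_true, if_false]
  split_ifs with h
  · rcases h with rfl | rfl | rfl <;> simp [emitTok]
  · have h1 : c ≠ '(' := fun hh => h (Or.inl hh)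
    have h2 : c ≠ ')' := fun hh => h (Or.inr (Or.inl hh))
    have h3 : c ≠ ',' := fun hh => h (Or.inr (Or.inr hh))
    simp [emitTok, h1, h2, h3]

theorem altGo_fuel : ∀ (f g : Nat) (cs : List Char), cs.length ≤ f → cs.length ≤ g →
    altGo f cs = altGo g cs := by
  intro f
  induction f with
  | zero =>
    intro g cs h _
    have : cs = [] := List.eq_nil_of_length_eq_zero (Nat.le_zero.mp h)
    subst this; cases g <;> simp [altGo]
  | succ f ihf =>
    intro g cs hf hg
    match cs with
    | [] => cases g <;> simp [altGo]
    | c :: rest =>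
      match g with
      | 0 => simp at hg
      | g + 1 =>
        rw [altGo, altGo]
        simp only [List.length_cons] at hf hg
        by_cases hc : pyIsNumeric c = true
        · simp only [hc, if_true]
          have hdl : ((c :: rest).dropWhile pyIsNumeric).length ≤ rest.length := by
            simp only [List.dropWhile_cons, hc, if_true]
            exact List.length_dropWhile_le _ _
          rw [ihf g ((c :: rest).dropWhile pyIsNumeric) (by omega) (by omega)]
        · have hc' : pyIsNumeric c = false := by simpa using hc
          simp only [hc', Bool.false_eq_true, if_false]
          split_ifs with hbr
          · rw [ihf g rest (by omega) (by omega)]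
          · exact ihf g rest (by omega) (by omega)

theorem mainA : ∀ (n : Nat) (cs : List Char), cs.length ≤ n →
    finalizeA (List.foldl stepA ([], []) cs) = altGo n cs := by
  intro n
  induction n with
  | zero =>
    intro cs h
    have : cs = [] := List.eq_nil_of_length_eq_zero (Nat.le_zero.mp h)
    subst this; simp [finalizeA, altGo]
  | succ n ih =>
    intro cs hlen
    match cs with
    | [] => simp [finalizeA, altGo]
    | c :: rest =>
      by_cases hc : pyIsNumeric c = true
      · have hdecomp : (c :: rest).takeWhile pyIsNumeric ++ (c :: rest).dropWhile pyIsNumeric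
            = c :: rest := List.takeWhile_append_dropWhile
        have hrun : ∀ d ∈ (c :: rest).takeWhile pyIsNumeric, pyIsNumeric d = true :=
          fun d hd => List.mem_takeWhile_imp hd
        have htake : (c :: rest).takeWhile pyIsNumeric = c :: rest.takeWhile pyIsNumeric := by
          simp [hc]
        have hdrop : (c :: rest).dropWhile pyIsNumeric = rest.dropWhile pyIsNumeric := by
          simp [hc]
        rw [show List.foldl stepA ([], []) (c :: rest)
              = List.foldl stepA ([], []) ((c :: rest).takeWhile pyIsNumeric
                  ++ (c :: rest).dropWhile pyIsNumeric) by rw [hdecomp]]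
        rw [foldA_run _ hrun]
        rw [altGo]
        simp only [hc, if_true]
        match hrest : (c :: rest).dropWhile pyIsNumeric with
        | [] =>
          simp only [List.foldl_nil, List.nil_append, finalizeA, htake]
          simp [altGo]
        | d :: rest'' =>
          have hd : pyIsNumeric d = false := by
            have := List.head?_dropWhile_not pyIsNumeric (c :: rest)
            rw [hrest] at this; simpa using this
          have hlen2 : rest''.length ≤ n ∧ (d :: rest'').length ≤ n := by
            have h1 : ((c :: rest).dropWhile pyIsNumeric).length ≤ rest.length :=
              hdrop ▸ List.length_dropWhile_le _ _
            rw [hrest] at h1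
            simp only [List.length_cons] at h1 hlen ⊢
            omega
          simp only [List.foldl_cons, List.nil_append]
          rw [stepA_nonnum hd]
          simp only [htake, List.length_cons, List.nil_append]
          rw [if_pos (Nat.succ_pos _)]
          rw [foldA_hom, finalizeA_append]
          simp only [Prod.mk.eta]
          rw [ih rest'' hlen2.1]
          match n, hlen2 with
          | m + 1, hlen2 =>
            rw [altGo_nonnum hd m rest'',
                altGo_fuel (m + 1) m rest'' (by omega) (by simpa using hlen2.2)]
            simp
      · have hc' : pyIsNumeric c = false := by simpa using hc
        simp only [List.foldl_cons]
        rw [stepA_nonnum hc']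
        simp only [List.length_nil, List.nil_append]
        rw [if_neg (by omega)]
        rw [foldA_hom, finalizeA_append, ih rest (by simpa using Nat.le_of_succ_le_succ hlen),
            altGo_nonnum hc']
        simp

theorem altGo_eq_finalizeA (cs : List Char) :
    altGo cs.length cs = finalizeA (List.foldl stepA ([], []) cs) :=
  (mainA cs.length cs le_rfl).symm

theorem snd_last_nonnum {c : Char} (hc : pyIsNumeric c = false)
    (cs : List Char) (tokens : List String) (token : List Char) :
    (List.foldl stepA (tokens, token) (cs ++ [c])).2 = [] := by
  rw [List.foldl_append]
  rcases List.foldl stepA (tokens, token) cs with ⟨ts, tk⟩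
  simp only [List.foldl_cons, List.foldl_nil]
  rw [stepA_nonnum hc]

theorem snd_last_num {c : Char} (hc : pyIsNumeric c = true)
    (cs : List Char) (tokens : List String) (token : List Char) :
    (List.foldl stepA (tokens, token) (cs ++ [c])).2 ≠ [] := by
  rw [List.foldl_append]
  rcases List.foldl stepA (tokens, token) cs with ⟨ts, tk⟩
  simp only [List.foldl_cons, List.foldl_nil]
  rw [stepA_num hc]
  simp

theorem last_pyIsNumeric (s : String) (hne : s.toList ≠ []) :
    pyIsNumeric (s.toList.getLast hne) = (s.toList.reverse.headD 'x').isDigit := by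
  rw [List.headD_eq_head?_getD, List.head?_reverse, List.getLast?_eq_some_getLast hne]
  rfl

-- ===== VERDICT (by name: the statement is the Claim_ definition above) =====
theorem tokenize_newick_spec : Claim_unchanged_tokenize_newick := by
  intro s _ hD
  unfold tokenize_newick tokenize_newick_alt
  rcases hnil : s.toList with _ | ⟨c, rest⟩
  · simp [altGo]
  · have hne : s.toList ≠ [] := by rw [hnil]; simp
    have hlast : pyIsNumeric (s.toList.getLast hne) = false := by
      rw [last_pyIsNumeric s hne]
      unfold D_tokenize_newick at hD
      simpa using hD
    have hdecomp : s.toList = s.toList.dropLast ++ [s.toList.getLast hne] :=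
      (List.dropLast_append_getLast hne).symm
    rw [← hnil, altGo_eq_finalizeA, finalizeA,
        if_neg (by rw [hdecomp, snd_last_nonnum hlast]; simp)]

theorem tokenize_newick_changed : Claim_changed_tokenize_newick := by
  unfold Claim_changed_tokenize_newick; decide

theorem tokenize_newick_tight : Claim_exact_tokenize_newick := by
  intro s _ hD heq
  rcases hnil : s.toList with _ | ⟨c, rest⟩
  · unfold D_tokenize_newick at hD; rw [hnil] at hD; simp at hD
  · have hne : s.toList ≠ [] := by rw [hnil]; simp
    have hlast : pyIsNumeric (s.toList.getLast hne) = true := by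
      rw [last_pyIsNumeric s hne]; exact hD
    have hdecomp : s.toList = s.toList.dropLast ++ [s.toList.getLast hne] :=
      (List.dropLast_append_getLast hne).symm
    have hsnd : (List.foldl stepA ([], []) s.toList).2 ≠ [] := by
      rw [hdecomp]; exact snd_last_num hlast _ _ _
    unfold tokenize_newick tokenize_newick_alt at heq
    rw [altGo_eq_finalizeA, finalizeA, if_pos (by
      rcases h : (List.foldl stepA ([], []) s.toList).2 with _ | _
      · exact absurd h hsnd
      · simp)] at heq
    have := congrArg List.length heq
    simp at this
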